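-- pv_equiv track=rewrite | github.com/cvbate/GuyanaFloodMapping | ASF_Adaptive_Flood_Mapping/SARHazards_Lab_Floods_functions.py | group_polarizations
-- ===== SOURCE A (Python) =====
-- def group_polarizations(tiff_paths: list) -> dict:
--     pths = {}
--     for tiff in tiff_paths:
--         product_name = tiff.split('.')[0][:-2]
--         if product_name in pths:
--             pths[product_name].append(tiff)
--         else:
--             pths.update({product_name: [tiff]})
--             pths[product_name].sort()
--     return pths
-- ===== SOURCE B (Python) =====
-- def group_polarizations(tiff_paths: list) -> dict:
--     key = lambda t: t.split('.')[0][:-2]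
--     keys = dict.fromkeys(key(t) for t in tiff_paths)
--     return {k: [t for t in tiff_paths if key(t) == k] for k in keys}
-- ===== Notes on version B (the rewrite author's own statement) =====
-- stated objective: simpler
-- what changed: A builds the dict in one pass, dispatching each path into an existing or new bucket (with a no-op sort on new singletons); B first deduplicates the derived product keys in order of first appearance and then builds each group by a single filter comprehension over the input, a two-phase group-by decomposition.
import Mathlib
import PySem

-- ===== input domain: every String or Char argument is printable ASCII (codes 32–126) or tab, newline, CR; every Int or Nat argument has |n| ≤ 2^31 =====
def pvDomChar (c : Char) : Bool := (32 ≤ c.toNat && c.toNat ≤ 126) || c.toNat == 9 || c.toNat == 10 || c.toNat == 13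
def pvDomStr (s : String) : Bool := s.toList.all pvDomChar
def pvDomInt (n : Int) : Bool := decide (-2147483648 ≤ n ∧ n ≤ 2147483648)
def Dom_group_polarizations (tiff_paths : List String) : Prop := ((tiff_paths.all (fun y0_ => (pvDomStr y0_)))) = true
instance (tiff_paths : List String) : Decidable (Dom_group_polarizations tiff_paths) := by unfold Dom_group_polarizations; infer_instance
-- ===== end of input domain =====

-- B groups by first collecting the distinct product keys, then filtering the input once per key;
-- same return value as A (objective: simpler two-phase decomposition, no speed claim).

-- shared key helper: tiff.split('.')[0][:-2]  (split('.') always returns a nonempty list, so [0] never raises)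
def pvKey (t : String) : String :=
  PySem.Str.slice ((PySem.List.pyGet? ((PySem.Str.split? t ".").getD []) 0).getD "") none (some (-2))

-- ===== PORT A =====
def group_polarizations (tiff_paths : List String) : List (String × List String) :=
  (tiff_paths.foldl (fun (pths : PySem.Dict String (List String)) tiff =>
      let product_name := pvKey tiff
      if pths.contains product_name then
        pths.modify product_name [] (fun l => l ++ [tiff])
      else
        let pths := pths.insert product_name [tiff]
        pths.modify product_name [] (fun l => PySem.List.sorted l (fun x => x) false)
    ) PySem.Dict.empty).items

-- ===== PORT B =====
def group_polarizations_alt (tiff_paths : List String) : List (String × List String) :=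
  (PySem.List.dedup (tiff_paths.map pvKey)).map
    (fun k => (k, tiff_paths.filter (fun t => pvKey t == k)))

-- ===== PRECONDITION & SPEC =====
def Spec_group_polarizations (tiff_paths : List String) (out : List (String × List String)) : Prop := out = group_polarizations_alt tiff_paths
instance (tiff_paths : List String) (out : List (String × List String)) : Decidable (Spec_group_polarizations tiff_paths out) := by unfold Spec_group_polarizations; infer_instance

-- ===== CLAIM (what is proved, stated in full; the proofs are below) =====
def Claim_equal_group_polarizations : Prop := ∀ (tiff_paths : List String), Dom_group_polarizations tiff_paths → Spec_group_polarizations tiff_paths (group_polarizations tiff_paths)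

-- ===== LEMMAS AND PROOFS =====

-- A's loop body collapses to a single 'modify append' step
theorem pvStepA_eq (d : PySem.Dict String (List String)) (tiff : String) :
    (let product_name := pvKey tiff
     if d.contains product_name then
       d.modify product_name [] (fun l => l ++ [tiff])
     else
       let d := d.insert product_name [tiff]
       d.modify product_name [] (fun l => PySem.List.sorted l (fun x => x) false)) =
    d.modify (pvKey tiff) [] (fun l => l ++ [tiff]) := by
  by_cases h : d.contains (pvKey tiff)
  · simp [h]
  · simp only [h, if_neg, Bool.not_eq_true, PySem.Dict.modify]
    rw [PySem.Dict.getD_insert_self, PySem.Dict.insert_insert_self,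
        PySem.Dict.getD_of_not_contains (h := by simpa using h)]
    rfl

theorem group_polarizations_spec : Claim_equal_group_polarizations := by
  intro tiff_paths _
  unfold Spec_group_polarizations group_polarizations group_polarizations_alt
  have hstep : (tiff_paths.foldl (fun (pths : PySem.Dict String (List String)) tiff =>
      let product_name := pvKey tiff
      if pths.contains product_name then
        pths.modify product_name [] (fun l => l ++ [tiff])
      else
        let pths := pths.insert product_name [tiff]
        pths.modify product_name [] (fun l => PySem.List.sorted l (fun x => x) false))
      PySem.Dict.empty) =
      tiff_paths.foldl (fun (pths : PySem.Dict String (List String)) tiff =>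
        pths.modify (pvKey tiff) [] (fun l => l ++ [tiff])) PySem.Dict.empty := by
    congr 1
    funext d tiff
    exact pvStepA_eq d tiff
  rw [hstep]
  set D := tiff_paths.foldl (fun (pths : PySem.Dict String (List String)) tiff =>
      pths.modify (pvKey tiff) [] (fun l => l ++ [tiff])) PySem.Dict.empty with hD
  have hnd : D.keys.Nodup := by
    rw [hD]
    exact PySem.Dict.nodup_keys_foldl_modify_key tiff_paths pvKey [] _ _
      (by simp [PySem.Dict.keys_empty])
  have hkeys : D.keys = PySem.List.dedup (tiff_paths.map pvKey) := by
    rw [hD, PySem.Dict.keys_foldl_modify_key, PySem.Dict.keys_empty,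
        PySem.List.dedup_eq_ofList]
    rfl
  have hget : ∀ k, D.getD k [] = tiff_paths.filter (fun t => pvKey t == k) := by
    intro k
    rw [hD]
    have hmap : tiff_paths.foldl (fun (pths : PySem.Dict String (List String)) tiff =>
        pths.modify (pvKey tiff) [] (fun l => l ++ [tiff])) PySem.Dict.empty =
        (tiff_paths.map (fun t => (pvKey t, t))).foldl
          (fun (pths : PySem.Dict String (List String)) p =>
            pths.modify p.1 [] (fun l => l ++ [p.2])) PySem.Dict.empty := by
      rw [List.foldl_map]
    rw [hmap, PySem.Dict.getD_foldl_modify_append]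
    simp [List.filter_map, Function.comp_def]
  rw [PySem.Dict.items_eq_map_keys D hnd [], hkeys]
  apply List.map_congr_left
  intro k _
  rw [hget]
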